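-- pv_equiv track=rewrite | github.com/globalarray/inf-ege | 03_02_2025/number5.py | f
-- ===== SOURCE A (Python) =====
-- def f(n):
--     sums = []
--
--     for idx, k in enumerate(str(n)):
--         if idx == len(str(n))-1:
--             break
--         sums.append(int(k) + int(str(n)[idx+1]))
--     sums.sort()
--
--     return int("".join(map(str, sums[-2:])))
-- ===== SOURCE B (Python) =====
-- def f(n):
--     s = str(n)
--     best = []  # ascending list of (at most two) largest adjacent-digit sums seen so far
--     for x, y in zip(s, s[1:]):
--         v = int(x) + int(y)
--         if not best:
--             best = [v]
--         elif len(best) == 1: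
--             best = [v, best[0]] if v < best[0] else [best[0], v]
--         elif v > best[0]:
--             best = [v, best[1]] if v <= best[1] else [best[1], v]
--     return int("".join(map(str, best)))
-- ===== Notes on version B (the rewrite author's own statement) =====
-- stated objective: alternative
-- what changed: A sorts the full list of adjacent-digit sums and slices off the last two; B makes one pass over the digit pairs maintaining only the two largest sums in ascending order (no sort, O(1) extra state).
import Mathlib
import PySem

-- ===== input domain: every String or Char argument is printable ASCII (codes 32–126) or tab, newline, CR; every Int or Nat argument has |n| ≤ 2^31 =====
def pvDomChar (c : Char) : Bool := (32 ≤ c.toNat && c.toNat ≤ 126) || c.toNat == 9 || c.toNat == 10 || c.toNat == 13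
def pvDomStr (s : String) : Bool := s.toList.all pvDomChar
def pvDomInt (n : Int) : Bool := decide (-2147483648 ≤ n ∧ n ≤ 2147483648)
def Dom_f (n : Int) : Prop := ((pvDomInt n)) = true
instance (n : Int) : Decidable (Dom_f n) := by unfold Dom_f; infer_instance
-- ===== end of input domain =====

-- B replaces A's sort-then-slice by a single pass keeping the two largest adjacent-digit
-- sums in ascending order (objective: alternative; equivalence is about the return value only).

-- int(c) for a single character c (Pre_f keeps every character a digit)
def dgt (c : Char) : Int := (PySem.Int.ofChars? [c]).getD 0

-- ===== PORT A =====
-- loop body of A: if idx == len(str(n))-1: break; sums.append(int(k) + int(str(n)[idx+1]))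
def stepA (cs : List Char) (st : List Int × Bool) (p : Int × Char) : List Int × Bool :=
  if st.2 then st
  else if p.1 = (cs.length : Int) - 1 then (st.1, true)
  else (st.1 ++ [dgt p.2 + ((PySem.List.pyGet? cs (p.1 + 1)).map dgt).getD 0], false)

def f (n : Int) : Int :=
  let cs := PySem.Int.toChars n            -- str(n)
  let loop := (PySem.List.enumerate cs).foldl (stepA cs) ([], false)
  let sums := PySem.List.sorted loop.1 (fun x => x) false    -- sums.sort()
  (PySem.Int.ofChars? (PySem.Chars.join []
      ((PySem.List.slice sums (some (-2)) none).map PySem.Int.toChars))).getD 0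

-- ===== PORT B =====
-- one step of B's loop body: best is the ascending list of (≤ 2) largest sums seen
def top2step (best : List Int) (v : Int) : List Int :=
  match best with
  | [] => [v]
  | [a] => if v < a then [v, a] else [a, v]
  | a :: b :: _ => if a < v then (if v ≤ b then [v, b] else [b, v]) else best

def f_alt (n : Int) : Int :=
  let cs := PySem.Int.toChars n            -- s = str(n)
  -- for x, y in zip(s, s[1:]): best = top2step best (int(x)+int(y))
  let best := (cs.zip (PySem.List.slice cs (some 1) none)).foldl
    (fun best p => top2step best (dgt p.1 + dgt p.2)) []
  (PySem.Int.ofChars? (PySem.Chars.join [] (best.map PySem.Int.toChars))).getD 0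

-- ===== PRECONDITION & SPEC =====
-- Pre_f: Python A raises ValueError on every negative or single-digit input (int('-') on the
-- sign character, int('') when there is no adjacent digit pair); it returns normally on the rest.
def Pre_f (n : Int) : Prop := 10 ≤ n
instance (n : Int) : Decidable (Pre_f n) := by unfold Pre_f; infer_instance
def pvWitness_f : Int := 2025

def Spec_f (n : Int) (out : Int) : Prop := out = f_alt n
instance (n : Int) (out : Int) : Decidable (Spec_f n out) := by unfold Spec_f; infer_instance

-- ===== CLAIM (what is proved, stated in full; the proofs are below) =====
def Claim_equal_f : Prop := ∀ (n : Int), Dom_f n → Pre_f n → Spec_f n (f n)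

-- ===== LEMMAS AND PROOFS =====

-- last two elements of a list (what xs[-2:] keeps)
def last2 : List Int → List Int
  | _ :: b :: c :: t => last2 (b :: c :: t)
  | l => l

theorem last2_eq_drop : ∀ l : List Int, last2 l = l.drop (l.length - 2)
  | [] => rfl
  | [_] => rfl
  | [_, _] => rfl
  | a :: b :: c :: t => by
    show last2 (b :: c :: t) = _
    rw [last2_eq_drop (b :: c :: t)]
    have h : (a :: b :: c :: t).length - 2 = ((b :: c :: t).length - 2) + 1 := by
      simp only [List.length_cons]; omega
    rw [h, List.drop_succ_cons]

theorem last2_pair (a b : Int) (t : List Int) :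
    ∃ p q, last2 (a :: b :: t) = [p, q] ∧ p ∈ a :: b :: t ∧ q ∈ a :: b :: t := by
  induction t generalizing a b with
  | nil => exact ⟨a, b, rfl, by simp, by simp⟩
  | cons c t ih =>
    obtain ⟨p, q, h, hp, hq⟩ := ih b c
    exact ⟨p, q, h, List.mem_cons_of_mem a hp, List.mem_cons_of_mem a hq⟩

theorem last2_cons_of_two_le (a : Int) (l : List Int) (h : 2 ≤ l.length) :
    last2 (a :: l) = last2 l := by
  match l with
  | b :: c :: t => rfl
  | [] | [_] => simp at h

theorem length_insertBy (bef : Int → Int → Bool) (v : Int) :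
    ∀ l : List Int, (PySem.List.insertBy bef v l).length = l.length + 1 := by
  intro l
  induction l with
  | nil => rfl
  | cons a t ih => simp only [PySem.List.insertBy]; split <;> simp [ih]

-- inserting v into an ascending list moves its last-two window exactly as B's step does
theorem ins_last2 (v : Int) : ∀ s : List Int, s.Pairwise (· ≤ ·) →
    last2 (PySem.List.insertBy (fun a b => decide (a < b)) v s) = top2step (last2 s) v := by
  intro s
  induction s with
  | nil => intro _; rfl
  | cons a t ih =>
    intro hp
    rw [List.pairwise_cons] at hp
    obtain ⟨ha, hpt⟩ := hp
    simp only [PySem.List.insertBy]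
    by_cases hva : v < a
    · rw [if_pos (by simpa using hva)]
      match t with
      | [] => simp [last2, top2step, hva]
      | b :: u =>
        rw [show last2 (v :: a :: b :: u) = last2 (a :: b :: u) from rfl]
        obtain ⟨p, q, hpq, hpm, _⟩ := last2_pair a b u
        have hvp : v < p := by
          rcases List.mem_cons.mp hpm with rfl | h
          · exact hva
          · exact lt_of_lt_of_le hva (ha p h)
        rw [hpq]
        show [p, q] = (if p < v then (if v ≤ q then [v, q] else [q, v]) else [p, q])
        rw [if_neg (by omega)]
    · rw [if_neg (by simpa using hva)]
      match t with
      | [] => simp [PySem.List.insertBy, last2, top2step, hva]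
      | b :: u =>
        have h2 : 2 ≤ (PySem.List.insertBy (fun a b => decide (a < b)) v (b :: u)).length := by
          rw [length_insertBy]; simp
        rw [last2_cons_of_two_le a _ h2, ih hpt]
        have hab : a ≤ b := ha b (by simp)
        match u with
        | _ :: _ => rfl
        | [] =>
          show top2step [b] v = top2step [a, b] v
          show (if v < b then [v, b] else [b, v])
             = (if a < v then (if v ≤ b then [v, b] else [b, v]) else [a, b])
          split_ifs <;> simp_all <;> omega

-- B's one-pass fold computes the last two of the sorted list
theorem top2_eq (l : List Int) :
    List.foldl top2step [] l = last2 (PySem.List.sorted l (fun x => x) false) := by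
  induction l using List.reverseRecOn with
  | nil => rfl
  | append_singleton l v ih =>
    rw [List.foldl_append, List.foldl_cons, List.foldl_nil, ih,
        ← ins_last2 v _ (by simpa using PySem.List.sorted_pairwise l (fun x => x)),
        PySem.List.sorted_eq_foldl_insertBy (l ++ [v]), List.foldl_append,
        List.foldl_cons, List.foldl_nil, ← PySem.List.sorted_eq_foldl_insertBy l]

-- A's enumerate/break loop collects exactly the adjacent-pair sums
theorem loopA (cs : List Char) : ∀ (t pre : List Char), cs = pre ++ t → ∀ acc : List Int,
    (PySem.List.enumerate t (pre.length : Int)).foldl (stepA cs) (acc, false)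
      = (acc ++ (t.zip t.tail).map (fun p => dgt p.1 + dgt p.2), !t.isEmpty) := by
  intro t
  induction t with
  | nil => intro pre _ acc; simp [PySem.List.enumerate_nil]
  | cons x t ih =>
    intro pre hcs acc
    rw [PySem.List.enumerate_cons, List.foldl_cons]
    match t with
    | [] =>
      have hlen : (pre.length : Int) = (cs.length : Int) - 1 := by
        subst hcs; simp
      simp [stepA, hlen, PySem.List.enumerate_nil]
    | y :: u =>
      have hlen : ¬ ((pre.length : Int) = (cs.length : Int) - 1) := by
        subst hcs; simp; omega
      have hget : PySem.List.pyGet? cs ((pre.length : Int) + 1) = some y := by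
        subst hcs
        have := PySem.List.pyGet?_append_right pre (x :: y :: u) 1
        simpa using this
      have hrec := ih (pre ++ [x]) (by simp [hcs]) (acc ++ [dgt x + dgt y])
      simp only [List.length_append, List.length_cons, List.length_nil, Nat.cast_add,
        Nat.cast_one, zero_add] at hrec
      rw [show stepA cs (acc, false) ((pre.length : Int), x) = (acc ++ [dgt x + dgt y], false) from
        by simp [stepA, hlen, hget]]
      rw [hrec]
      simp

-- ===== VERDICT (by name: the statement is the Claim_ definition above) =====
theorem f_spec : Claim_equal_f := by
  intro n _ _
  unfold Spec_f
  dsimp only [f, f_alt]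
  have hloop := loopA (PySem.Int.toChars n) (PySem.Int.toChars n) [] rfl []
  simp only [List.length_nil, Nat.cast_zero, List.nil_append] at hloop
  rw [hloop]
  rw [PySem.List.slice_from_one]
  rw [show ((PySem.Int.toChars n).zip (PySem.Int.toChars n).tail).foldl
        (fun best p => top2step best (dgt p.1 + dgt p.2)) [] =
      List.foldl top2step []
        (((PySem.Int.toChars n).zip (PySem.Int.toChars n).tail).map
          (fun p => dgt p.1 + dgt p.2)) from (List.foldl_map).symm]
  rw [top2_eq]
  rw [PySem.List.slice_from_neg_ofNat _ 2 (by omega), ← last2_eq_drop]
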